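-- pv_equiv track=rewrite | github.com/yo0oni/ProblemSolving | Programmers/Level 2/더 맵게.py | solution
-- ===== SOURCE A (Python) =====
-- from heapq import heapify, heappush, heappop
--
-- def solution(scoville, K):
--     answer = 0
--     heapify(scoville)
--
--     while scoville[0] < K:
--
--         if len(scoville) <= 2 and (scoville[0]+scoville[1]*2) < K:
--             return -1
--
--         heappush(scoville, heappop(scoville)+(heappop(scoville)*2))
--         answer += 1
--
--     return answer
-- ===== SOURCE B (Python) =====
-- def solution(scoville, K):
--     # sorted-list simulation instead of a heap; sorts the argument in place (A heapifies it in place)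
--     scoville.sort()
--     answer = 0
--     while scoville[0] < K:
--         if len(scoville) <= 2 and scoville[0] + scoville[1] * 2 < K:
--             return -1
--         merged = scoville[0] + scoville[1] * 2
--         scoville[:] = scoville[2:]
--         i = 0
--         while i < len(scoville) and scoville[i] < merged:
--             i += 1
--         scoville.insert(i, merged)
--         answer += 1
--     return answer
-- ===== Notes on version B (the rewrite author's own statement) =====
-- stated objective: alternative
-- what changed: Replaces the binary min-heap (heapify/heappush/heappop) by a sorted list maintained with ordered insertion: sort once, pop the two smallest from the front, and re-insert the merged value at its position found by a scan.
import Mathlib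
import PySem

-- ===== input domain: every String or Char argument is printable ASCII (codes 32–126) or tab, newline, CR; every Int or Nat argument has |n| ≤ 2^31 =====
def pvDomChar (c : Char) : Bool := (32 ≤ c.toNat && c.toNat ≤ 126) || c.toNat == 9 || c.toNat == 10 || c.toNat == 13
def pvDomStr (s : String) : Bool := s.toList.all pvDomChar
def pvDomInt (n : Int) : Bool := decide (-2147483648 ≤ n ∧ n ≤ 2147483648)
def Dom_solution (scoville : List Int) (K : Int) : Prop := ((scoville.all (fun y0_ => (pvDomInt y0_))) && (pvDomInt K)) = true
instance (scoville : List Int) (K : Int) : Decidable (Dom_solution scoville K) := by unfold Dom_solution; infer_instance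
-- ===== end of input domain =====

-- B replaces A's binary min-heap by a sorted list with ordered insertion (alternative data structure,
-- not faster); both A and B reorder the passed-in list in place — the equivalence is about the return value.

-- ===== PORT A =====
-- heapq is ported at value level: heapify permutes the list in place (multiset unchanged, heap[0] is the
-- minimum), heappop removes and returns the minimum, heappush adds an element.  scoville[0] on the heap is
-- its minimum; when len(scoville) == 2, scoville[1] is the only other element = the minimum of the rest.
def loopA (l : List Int) (K ans : Int) : Int :=
  match hm : PySem.List.min? l (fun x => x) with
  | none => ans                                   -- empty heap: Python raises IndexError (outside Pre_)
  | some m =>                                     -- m = scoville[0]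
    if m < K then
      match hm2 : PySem.List.min? (l.erase m) (fun x => x) with
      | none => -1                                -- len 1: scoville[1] raises IndexError (outside Pre_)
      | some m2 =>
        if l.length ≤ 2 ∧ m + m2 * 2 < K then -1  -- m2 = scoville[1] when len == 2
        else loopA ((l.erase m).erase m2 ++ [m + m2 * 2]) K (ans + 1)
    else ans
termination_by l.length
decreasing_by
  have h1 : m ∈ l := PySem.List.min?_mem hm
  have h2 : m2 ∈ l.erase m := PySem.List.min?_mem hm2
  have e1 : (l.erase m).length = l.length - 1 := List.length_erase_of_mem h1
  have e2 : ((l.erase m).erase m2).length = (l.erase m).length - 1 := List.length_erase_of_mem h2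
  have hp : 0 < l.length := List.length_pos_of_mem h1
  have hp2 : 0 < (l.erase m).length := List.length_pos_of_mem h2
  simp [e2, e1]
  omega

def solution (scoville : List Int) (K : Int) : Int :=
  loopA scoville K 0

-- ===== PORT B =====
-- the inner while-loop of Source B: walk past the elements smaller than v, insert v there
def insertOrd (v : Int) : List Int → List Int
  | [] => [v]
  | x :: xs => if x < v then x :: insertOrd v xs else v :: x :: xs

def loopB (s : List Int) (K ans : Int) : Int :=
  match s with
  | [] => ans                                     -- Python raises IndexError (outside Pre_)
  | a :: rest =>
    if a < K then
      match rest with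
      | [] => -1                                  -- scoville[1] raises IndexError (outside Pre_)
      | b :: rest2 =>
        if (a :: b :: rest2).length ≤ 2 ∧ a + b * 2 < K then -1
        else loopB (insertOrd (a + b * 2) rest2) K (ans + 1)
    else ans
termination_by s.length
decreasing_by
  have : ∀ (v : Int) (t : List Int), (insertOrd v t).length = t.length + 1 := by
    intro v t; induction t with
    | nil => simp [insertOrd]
    | cons x xs ih => simp [insertOrd]; split <;> simp [ih]
  simp [this]

def solution_alt (scoville : List Int) (K : Int) : Int :=
  loopB (PySem.List.sorted scoville (fun x => x)) K 0

-- ===== PRECONDITION & SPEC =====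
-- Pre_ excludes exactly the inputs where A raises IndexError: the empty list (scoville[0]) and a
-- singleton list below K (scoville[1]); B raises there too.
def Pre_solution (scoville : List Int) (K : Int) : Prop :=
  scoville ≠ [] ∧ (scoville.length = 1 → K ≤ scoville.headI)
instance (scoville : List Int) (K : Int) : Decidable (Pre_solution scoville K) := by
  unfold Pre_solution; infer_instance
def pvWitness_solution : List Int × Int := ([1, 2, 3, 9, 10, 12], 7)

def Spec_solution (scoville : List Int) (K : Int) (out : Int) : Prop := out = solution_alt scoville K
instance (scoville : List Int) (K : Int) (out : Int) : Decidable (Spec_solution scoville K out) := by unfold Spec_solution; infer_instance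

-- ===== CLAIM (what is proved, stated in full; the proofs are below) =====
def Claim_equal_solution : Prop := ∀ (scoville : List Int) (K : Int), Dom_solution scoville K → Pre_solution scoville K → Spec_solution scoville K (solution scoville K)

-- ===== LEMMAS AND PROOFS =====

theorem insertOrd_eq (v : Int) (xs : List Int) :
    insertOrd v xs = List.orderedInsert (· ≤ ·) v xs := by
  induction xs with
  | nil => rfl
  | cons x t ih =>
    by_cases h : x < v
    · simp [insertOrd, List.orderedInsert, h, not_le.mpr h, ih]
    · simp [insertOrd, List.orderedInsert, h, not_lt.mp h]

theorem min?_of_perm_sorted {l : List Int} {a : Int} {rest : List Int}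
    (hp : l.Perm (a :: rest)) (hs : (a :: rest).Pairwise (· ≤ ·)) :
    PySem.List.min? l (fun x => x) = some a := by
  have ha : a ∈ l := hp.mem_iff.mpr (by simp)
  cases hcase : PySem.List.min? l (fun x => x) with
  | none =>
    have : l = [] := (PySem.List.min?_eq_none_iff _ _).mp hcase
    simp [this] at ha
  | some m =>
    have hm_mem : m ∈ l := PySem.List.min?_mem hcase
    have hma : m ≤ a := PySem.List.min?_isMin hcase a ha
    have hms : m ∈ a :: rest := hp.mem_iff.mp hm_mem
    obtain ⟨hall, -⟩ := List.pairwise_cons.mp hs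
    have ham : a ≤ m := by
      rcases List.mem_cons.mp hms with h | h
      · exact le_of_eq h.symm
      · exact hall m h
    rw [le_antisymm hma ham]

theorem loopB_cons (a : Int) (rest : List Int) (K ans : Int) :
    loopB (a :: rest) K ans =
      (if a < K then
        match rest with
        | [] => -1
        | b :: rest2 =>
          if (a :: b :: rest2).length ≤ 2 ∧ a + b * 2 < K then -1
          else loopB (insertOrd (a + b * 2) rest2) K (ans + 1)
      else ans) := by
  rw [loopB.eq_def]

theorem loopA_eq_loopB (n : ℕ) : ∀ (l s : List Int) (K ans : Int), l.length ≤ n →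
    l.Perm s → s.Pairwise (· ≤ ·) → loopA l K ans = loopB s K ans := by
  induction n with
  | zero =>
    intro l s K ans hn hp hs
    have hl : l = [] := List.length_eq_zero_iff.mp (Nat.le_zero.mp hn)
    subst hl
    have hs0 : s = [] := hp.symm.eq_nil
    subst hs0
    simp [loopA, loopB, PySem.List.min?]
  | succ n ih =>
    intro l s K ans hn hp hs
    cases s with
    | nil =>
      have hl : l = [] := hp.eq_nil
      subst hl
      simp [loopA, loopB, PySem.List.min?]
    | cons a rest =>
      have hmin : PySem.List.min? l (fun x => x) = some a := min?_of_perm_sorted hp hs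
      have hlen : l.length = rest.length + 1 := by simpa using hp.length_eq
      rw [loopA, loopB_cons, hmin]
      by_cases hK : a < K
      · simp only [hK, if_pos]
        have hperase : (l.erase a).Perm rest := by
          have := hp.erase a
          simpa [List.erase_cons_head] using this
        cases rest with
        | nil =>
          have h0 : l.erase a = [] := hperase.eq_nil
          rw [h0]
          simp [PySem.List.min?]
        | cons b rest2 =>
          have hs' : (b :: rest2).Pairwise (· ≤ ·) := hs.of_cons
          have hmin2 : PySem.List.min? (l.erase a) (fun x => x) = some b :=
            min?_of_perm_sorted hperase hs'
          rw [hmin2]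
          have hL : l.length = rest2.length + 2 := by simpa using hlen
          have hlen_eq : (a :: b :: rest2).length = l.length := by
            simp only [List.length_cons, hL]
          by_cases hcond : l.length ≤ 2 ∧ a + b * 2 < K
          · have hcond' : rest2 = [] ∧ a + b * 2 < K := by
              refine ⟨List.length_eq_zero_iff.mp ?_, hcond.2⟩
              have := hcond.1
              omega
            simp [hcond, hcond']
          · have hcond' : ¬ (rest2 = [] ∧ a + b * 2 < K) := by
              rintro ⟨h1, h2⟩
              apply hcond
              refine ⟨?_, h2⟩
              subst h1
              simp at hL
              omega
            simp [hcond, hcond']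
            have hperase2 : ((l.erase a).erase b).Perm rest2 := by
              have := hperase.erase b
              simpa [List.erase_cons_head] using this
            have hlen3 : ((l.erase a).erase b).length = rest2.length := by
              simpa using hperase2.length_eq
            apply ih
            · have h5 := hn
              rw [hL] at h5
              simp only [List.length_append, hlen3, List.length_cons, List.length_nil]
              omega
            · have p1 : ((l.erase a).erase b ++ [a + b * 2]).Perm
                  ((a + b * 2) :: (l.erase a).erase b) :=
                List.perm_append_singleton _ _
              have p2 : ((a + b * 2) :: (l.erase a).erase b).Perm ((a + b * 2) :: rest2) :=
                hperase2.cons _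
              have p3 : ((a + b * 2) :: rest2).Perm (insertOrd (a + b * 2) rest2) := by
                rw [insertOrd_eq]
                exact (List.perm_orderedInsert _ _ _).symm
              exact (p1.trans p2).trans p3
            · rw [insertOrd_eq]
              exact List.Pairwise.orderedInsert _ _ hs'.of_cons
      · simp [hK]

theorem solution_eq (scoville : List Int) (K : Int) :
    solution scoville K = solution_alt scoville K := by
  unfold solution solution_alt
  exact loopA_eq_loopB scoville.length scoville _ K 0 le_rfl
    (PySem.List.sorted_perm scoville _ false).symm
    (by simpa using PySem.List.sorted_pairwise (xs := scoville) (key := fun x => x))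

-- ===== VERDICT (by name: the statement is the Claim_ definition above) =====
theorem solution_spec : Claim_equal_solution := by
  intro scoville K _ _
  exact solution_eq scoville K
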